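-- pv_equiv track=rewrite | github.com/aghilessdj/Bataille-Navale | BatailleNavale/controleurs/includes.py | obtenir_cibles_potentielles_grille
-- ===== SOURCE A (Python) =====
-- def obtenir_cibles_potentielles_grille(grille_vue_par_bot):
--     """
--     Renvoie les cases non explorées par le bot
--     """
--     lettres = ['A', 'B', 'C', 'D', 'E', 'F', 'G', 'H', 'I', 'J']
--     potentielles = []
--
--     for y_idx, lettre in enumerate(lettres):
--         for x in range(1, 11):
--             coord = f"{lettre}{x}"
--             etat = grille_vue_par_bot.get(coord, 'eau')
--             if etat in ['eau', 'bateau']: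
--                 if (x + y_idx) % 2 == 0:
--                     potentielles.append(coord)
--
--     if not potentielles:
--         for y_idx, lettre in enumerate(lettres):
--             for x in range(1, 11):
--                 coord = f"{lettre}{x}"
--                 if grille_vue_par_bot.get(coord, 'eau') in ['eau', 'bateau']:
--                     potentielles.append(coord)
--
--     return potentielles
-- ===== SOURCE B (Python) =====
-- def obtenir_cibles_potentielles_grille(grille_vue_par_bot):
--     """
--     Renvoie les cases non explorées par le bot
--     """
--     lettres = ['A', 'B', 'C', 'D', 'E', 'F', 'G', 'H', 'I', 'J']
--     parite = []
--     toutes = []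
--
--     for y_idx, lettre in enumerate(lettres):
--         for x in range(1, 11):
--             coord = f"{lettre}{x}"
--             if grille_vue_par_bot.get(coord, 'eau') in ['eau', 'bateau']:
--                 toutes.append(coord)
--                 if (x + y_idx) % 2 == 0:
--                     parite.append(coord)
--
--     return parite if parite else toutes
-- ===== Notes on version B (the rewrite author's own statement) =====
-- stated objective: simpler
-- what changed: One single pass over the 10x10 grid builds both the parity-filtered list and the full fallback list simultaneously, replacing A's conditional second full scan; the fallback is then chosen after the loop.
import Mathlib
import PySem

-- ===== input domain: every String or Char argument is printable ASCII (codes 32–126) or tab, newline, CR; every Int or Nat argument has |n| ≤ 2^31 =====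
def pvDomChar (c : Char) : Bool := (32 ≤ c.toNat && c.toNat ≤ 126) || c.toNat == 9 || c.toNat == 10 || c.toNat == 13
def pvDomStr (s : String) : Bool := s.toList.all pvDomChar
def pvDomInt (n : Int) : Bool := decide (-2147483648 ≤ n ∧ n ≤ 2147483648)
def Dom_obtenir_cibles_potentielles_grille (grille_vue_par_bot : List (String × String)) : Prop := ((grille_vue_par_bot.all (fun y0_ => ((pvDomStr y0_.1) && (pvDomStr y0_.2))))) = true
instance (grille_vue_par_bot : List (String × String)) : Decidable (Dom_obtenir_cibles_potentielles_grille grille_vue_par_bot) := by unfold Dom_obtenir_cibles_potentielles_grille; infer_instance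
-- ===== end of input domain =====

-- B replaces A's conditional second full grid scan by a single pass that builds the
-- parity-filtered list and the full fallback list simultaneously (objective: simpler).

def pvLettres : List String := ["A", "B", "C", "D", "E", "F", "G", "H", "I", "J"]

-- ===== PORT A =====
def obtenir_cibles_potentielles_grille (grille_vue_par_bot : List (String × String)) : List String :=
  let d := PySem.Dict.ofList grille_vue_par_bot
  let potentielles :=
    (PySem.List.enumerate pvLettres).foldl (fun acc p =>
      (PySem.List.pyRange 1 11 1).foldl (fun acc x =>
        let etat := PySem.Dict.getD d (p.2 ++ PySem.Int.toStr x) "eau"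
        if etat = "eau" ∨ etat = "bateau" then
          if PySem.Int.mod (x + p.1) 2 = 0 then acc ++ [p.2 ++ PySem.Int.toStr x] else acc
        else acc) acc) []
  if potentielles = [] then
    (PySem.List.enumerate pvLettres).foldl (fun acc p =>
      (PySem.List.pyRange 1 11 1).foldl (fun acc x =>
        if PySem.Dict.getD d (p.2 ++ PySem.Int.toStr x) "eau" = "eau" ∨
           PySem.Dict.getD d (p.2 ++ PySem.Int.toStr x) "eau" = "bateau" then
          acc ++ [p.2 ++ PySem.Int.toStr x]
        else acc) acc) potentielles
  else potentielles

-- ===== PORT B =====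
def obtenir_cibles_potentielles_grille_alt (grille_vue_par_bot : List (String × String)) : List String :=
  let d := PySem.Dict.ofList grille_vue_par_bot
  let r :=
    (PySem.List.enumerate pvLettres).foldl (fun (s : List String × List String) p =>
      (PySem.List.pyRange 1 11 1).foldl (fun s x =>
        if PySem.Dict.getD d (p.2 ++ PySem.Int.toStr x) "eau" = "eau" ∨
           PySem.Dict.getD d (p.2 ++ PySem.Int.toStr x) "eau" = "bateau" then
          (if PySem.Int.mod (x + p.1) 2 = 0 then s.1 ++ [p.2 ++ PySem.Int.toStr x] else s.1,
           s.2 ++ [p.2 ++ PySem.Int.toStr x])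
        else s) s) (([], []) : List String × List String)
  if r.1 = [] then r.2 else r.1

-- ===== PRECONDITION & SPEC =====
def Spec_obtenir_cibles_potentielles_grille (grille_vue_par_bot : List (String × String)) (out : List String) : Prop := out = obtenir_cibles_potentielles_grille_alt grille_vue_par_bot
instance (grille_vue_par_bot : List (String × String)) (out : List String) : Decidable (Spec_obtenir_cibles_potentielles_grille grille_vue_par_bot out) := by unfold Spec_obtenir_cibles_potentielles_grille; infer_instance

-- ===== CLAIM (what is proved, stated in full; the proofs are below) =====
def Claim_equal_obtenir_cibles_potentielles_grille : Prop := ∀ (grille_vue_par_bot : List (String × String)), Dom_obtenir_cibles_potentielles_grille grille_vue_par_bot → Spec_obtenir_cibles_potentielles_grille grille_vue_par_bot (obtenir_cibles_potentielles_grille grille_vue_par_bot)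

-- ===== LEMMAS AND PROOFS =====

-- A foldl whose step acts componentwise on a pair state is the pair of the two foldls.
theorem pv_foldl_pair {α σ τ : Type} (h : σ × τ → α → σ × τ) (f : σ → α → σ) (g : τ → α → τ)
    (hh : ∀ s a, h s a = (f s.1 a, g s.2 a)) :
    ∀ (l : List α) (s : σ × τ), l.foldl h s = (l.foldl f s.1, l.foldl g s.2)
  | [], s => rfl
  | a :: l, s => by
      rw [List.foldl_cons, List.foldl_cons, List.foldl_cons, hh,
        pv_foldl_pair h f g hh l]

-- B's single pass computes exactly (A's first scan, A's second scan).
theorem pv_pass_eq (d : PySem.Dict String String) (s : List String × List String) :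
    (PySem.List.enumerate pvLettres).foldl (fun (s : List String × List String) p =>
      (PySem.List.pyRange 1 11 1).foldl (fun s x =>
        if PySem.Dict.getD d (p.2 ++ PySem.Int.toStr x) "eau" = "eau" ∨
           PySem.Dict.getD d (p.2 ++ PySem.Int.toStr x) "eau" = "bateau" then
          (if PySem.Int.mod (x + p.1) 2 = 0 then s.1 ++ [p.2 ++ PySem.Int.toStr x] else s.1,
           s.2 ++ [p.2 ++ PySem.Int.toStr x])
        else s) s) s =
    ((PySem.List.enumerate pvLettres).foldl (fun acc p =>
      (PySem.List.pyRange 1 11 1).foldl (fun acc x =>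
        let etat := PySem.Dict.getD d (p.2 ++ PySem.Int.toStr x) "eau"
        if etat = "eau" ∨ etat = "bateau" then
          if PySem.Int.mod (x + p.1) 2 = 0 then acc ++ [p.2 ++ PySem.Int.toStr x] else acc
        else acc) acc) s.1,
     (PySem.List.enumerate pvLettres).foldl (fun acc p =>
      (PySem.List.pyRange 1 11 1).foldl (fun acc x =>
        if PySem.Dict.getD d (p.2 ++ PySem.Int.toStr x) "eau" = "eau" ∨
           PySem.Dict.getD d (p.2 ++ PySem.Int.toStr x) "eau" = "bateau" then
          acc ++ [p.2 ++ PySem.Int.toStr x]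
        else acc) acc) s.2) := by
  apply pv_foldl_pair
  intro s p
  apply pv_foldl_pair
  intro s x
  dsimp only
  split <;> rfl

-- ===== VERDICT (by name: the statement is the Claim_ definition above) =====
theorem obtenir_cibles_potentielles_grille_spec : Claim_equal_obtenir_cibles_potentielles_grille := by
  intro g _
  unfold Spec_obtenir_cibles_potentielles_grille
  unfold obtenir_cibles_potentielles_grille obtenir_cibles_potentielles_grille_alt
  dsimp only
  rw [pv_pass_eq]
  dsimp only
  split
  · next h => rw [h]
  · rfl
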